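-- pv_equiv track=rewrite | github.com/S222em/aoc | 2015/day3_b/main.py | find_visited
-- ===== SOURCE A (Python) =====
-- def find_visited(directions):
--     """
--     Finds all the houses that will be visited at least once,
--     while following the directions, split between Santa and Robot-Santa
--     :param directions:
--     :return:
--     """
--     x1, y1 = 0, 0
--     x2, y2 = 0, 0
--
--     visited = {(x1, y1)}
--
--     for i, (dx, dy) in enumerate(directions):
--         if i % 2 == 0:
--             x1 += dx
--             y1 += dy
--             visited.add((x1, y1))
--             continue
--
--         x2 += dx
--         y2 += dy
--         visited.add((x2, y2))
--
--     return visited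
-- ===== SOURCE B (Python) =====
-- def _walk(moves):
--     x, y = 0, 0
--     path = []
--     for dx, dy in moves:
--         x += dx
--         y += dy
--         path.append((x, y))
--     return path
--
--
-- def find_visited(directions):
--     """
--     Same houses, computed by splitting the moves up front: Santa walks the
--     even-index slice, Robot the odd-index slice; the two paths are then
--     interleaved back into visit order and deduplicated once.
--     """
--     directions = list(directions)
--     santa = _walk(directions[0::2])
--     robot = _walk(directions[1::2])
--     merged = [(0, 0)]
--     for s, r in zip(santa, robot):
--         merged.append(s)
--         merged.append(r)
--     merged += santa[len(robot):]
--     merged += robot[len(santa):]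
--     return set(merged)
-- ===== Notes on version B (the rewrite author's own statement) =====
-- stated objective: alternative
-- what changed: Instead of one interleaved loop with an i%2 branch, B slices the moves by index parity up front, walks each slice separately into a prefix-sum path, interleaves the two paths back into visit order and deduplicates once with set().
import Mathlib
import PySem

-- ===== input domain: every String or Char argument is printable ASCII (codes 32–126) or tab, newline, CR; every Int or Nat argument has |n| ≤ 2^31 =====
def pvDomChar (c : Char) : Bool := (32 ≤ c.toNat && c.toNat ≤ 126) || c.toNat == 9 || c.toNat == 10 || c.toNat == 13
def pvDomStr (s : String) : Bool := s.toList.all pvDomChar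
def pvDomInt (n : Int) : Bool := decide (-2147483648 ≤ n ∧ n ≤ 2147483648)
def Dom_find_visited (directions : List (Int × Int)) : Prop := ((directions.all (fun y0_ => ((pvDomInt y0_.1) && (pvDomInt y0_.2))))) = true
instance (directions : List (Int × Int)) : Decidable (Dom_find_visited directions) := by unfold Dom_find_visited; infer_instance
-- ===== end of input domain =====

-- B splits the moves up front into the even-index and odd-index slices, walks each slice as its
-- own prefix-sum path, interleaves the two paths back into visit order and deduplicates once
-- (objective: alternative decomposition; same set, same insertion order, same cost).

-- ===== PORT A =====
def find_visited (directions : List (Int × Int)) : List (Int × Int) :=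
  -- x1,y1 = 0,0 ; x2,y2 = 0,0 ; visited = {(0,0)} ; for i,(dx,dy) in enumerate(directions): …
  (((PySem.List.enumerate directions 0).foldl
      (fun (st : Int × Int × Int × Int × PySem.Set (Int × Int)) p =>
        let (x1, y1, x2, y2, vis) := st
        if PySem.Int.mod p.1 2 == 0 then
          (x1 + p.2.1, y1 + p.2.2, x2, y2, PySem.Set.add vis (x1 + p.2.1, y1 + p.2.2))
        else
          (x1, y1, x2 + p.2.1, y2 + p.2.2, PySem.Set.add vis (x2 + p.2.1, y2 + p.2.2)))
      (0, 0, 0, 0, PySem.Set.ofList [((0 : Int), (0 : Int))])).2.2.2.2)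

-- ===== PORT B =====
-- _walk(moves): x,y = 0,0; path = []; for dx,dy in moves: x+=dx; y+=dy; path.append((x,y))
def pvWalk (moves : List (Int × Int)) : Int × Int × List (Int × Int) :=
  moves.foldl
    (fun (st : Int × Int × List (Int × Int)) d =>
      (st.1 + d.1, st.2.1 + d.2, st.2.2 ++ [(st.1 + d.1, st.2.1 + d.2)]))
    (0, 0, [])

def find_visited_alt (directions : List (Int × Int)) : List (Int × Int) :=
  let santa := (pvWalk ((PySem.List.slice? directions (some 0) none 2).getD [])).2.2
  let robot := (pvWalk ((PySem.List.slice? directions (some 1) none 2).getD [])).2.2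
  let merged := (santa.zip robot).foldl (fun acc p => acc ++ [p.1, p.2]) [((0 : Int), (0 : Int))]
  let merged := merged ++ PySem.List.slice santa (some (PySem.List.len robot)) none
  let merged := merged ++ PySem.List.slice robot (some (PySem.List.len santa)) none
  PySem.Set.ofList merged

-- ===== PRECONDITION & SPEC =====
def Spec_find_visited (directions : List (Int × Int)) (out : List (Int × Int)) : Prop := out = find_visited_alt directions
instance (directions : List (Int × Int)) (out : List (Int × Int)) : Decidable (Spec_find_visited directions out) := by unfold Spec_find_visited; infer_instance

-- ===== CLAIM (what is proved, stated in full; the proofs are below) =====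
def Claim_equal_find_visited : Prop := ∀ (directions : List (Int × Int)), Dom_find_visited directions → Spec_find_visited directions (find_visited directions)

-- ===== LEMMAS AND PROOFS =====

-- elements at even indices of a list (what directions[0::2] selects)
def pvEvens {α : Type} : List α → List α
  | [] => []
  | [x] => [x]
  | x :: _ :: t => x :: pvEvens t

-- elements at odd indices of a list (what directions[1::2] selects)
def pvOdds {α : Type} (l : List α) : List α := pvEvens l.tail

-- the walked path (prefix sums of the moves) starting from (x, y)
def pvWalkFrom (x y : Int) : List (Int × Int) → List (Int × Int)
  | [] => []
  | d :: t => (x + d.1, y + d.2) :: pvWalkFrom (x + d.1) (y + d.2) t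

-- interleave two lists starting with the first
def pvInter {α : Type} : List α → List α → List α
  | [], b => b
  | a :: as, b => a :: pvInter b as
  termination_by a b => a.length + b.length
  decreasing_by simp; omega

theorem pvOdds_cons {α : Type} (x : α) (t : List α) : pvOdds (x :: t) = pvEvens t := rfl

theorem pvEvens_cons {α : Type} (x : α) (t : List α) : pvEvens (x :: t) = x :: pvOdds t := by
  cases t <;> rfl

theorem pvEvens_char {α : Type} (xs : List α) :
    List.filterMap (fun k : Nat => xs[2 * k]?) (List.range ((xs.length + 1) / 2)) = pvEvens xs := by
  induction xs using pvEvens.induct with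
  | case1 => simp [pvEvens]
  | case2 x => simp [pvEvens]
  | case3 x y t ih =>
    have hlen : (((x :: y :: t).length + 1) / 2) = ((t.length + 1) / 2) + 1 := by
      simp [List.length_cons]; omega
    rw [hlen, List.range_succ_eq_map]
    simp only [List.filterMap_cons, List.filterMap_map]
    have h0 : (x :: y :: t)[2 * 0]? = some x := by simp
    rw [h0]
    have hstep : ((fun k : Nat => (x :: y :: t)[2 * k]?) ∘ Nat.succ) = (fun k : Nat => t[2 * k]?) := by
      funext k
      simp [Nat.mul_succ]
    rw [hstep, ih]
    rfl

theorem slice_evens {α : Type} (xs : List α) :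
    (PySem.List.slice? xs (some 0) none 2).getD [] = pvEvens xs := by
  simp [PySem.List.slice?, PySem.List.sliceIndices]
  have hc : (if 0 < xs.length then (((xs.length : Int) + 2 - 1) / 2).toNat else 0) = (xs.length + 1) / 2 := by
    split_ifs with h <;> omega
  have hg : (fun k : Nat => xs[(2 * (k : Int)).toNat]?) = (fun k : Nat => xs[2 * k]?) := by
    funext k
    rw [show (2 * (k : Int)).toNat = 2 * k by omega]
  rw [hc, hg, pvEvens_char]

theorem slice_odds {α : Type} (xs : List α) :
    (PySem.List.slice? xs (some 1) none 2).getD [] = pvOdds xs := by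
  cases xs with
  | nil => rfl
  | cons x t =>
    simp only [PySem.List.slice?, PySem.List.sliceIndices]
    simp
    have hcount : (if 0 < t.length then (((t.length : Int) + 2 - 1) / 2).toNat else 0) = (t.length + 1) / 2 := by
      split_ifs with h <;> omega
    have hg : (fun k : Nat => (x :: t)[(1 + 2 * (k : Int)).toNat]?) = (fun k : Nat => t[2 * k]?) := by
      funext k
      rw [show (1 + 2 * (k : Int)).toNat = 2 * k + 1 by omega]
      simp
    rw [hcount, hg, pvEvens_char, pvOdds_cons]

theorem pvWalk_foldl (moves : List (Int × Int)) :
    ∀ (x y : Int) (acc : List (Int × Int)),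
      (moves.foldl
        (fun (st : Int × Int × List (Int × Int)) d =>
          (st.1 + d.1, st.2.1 + d.2, st.2.2 ++ [(st.1 + d.1, st.2.1 + d.2)]))
        (x, y, acc)).2.2 = acc ++ pvWalkFrom x y moves := by
  induction moves with
  | nil => intro x y acc; simp [pvWalkFrom]
  | cons d t ih => intro x y acc; simp [List.foldl_cons, pvWalkFrom, ih, List.append_assoc]

theorem pvWalk_eq (moves : List (Int × Int)) : (pvWalk moves).2.2 = pvWalkFrom 0 0 moves := by
  simpa using pvWalk_foldl moves 0 0 []

theorem pvZipMerge {α : Type} (a : List α) :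
    ∀ (b : List α) (acc : List α),
      ((a.zip b).foldl (fun acc p => acc ++ [p.1, p.2]) acc)
          ++ a.drop b.length ++ b.drop a.length
        = acc ++ pvInter a b := by
  induction a with
  | nil => intro b acc; simp [pvInter]
  | cons x as ih =>
    intro b acc
    cases b with
    | nil => simp [pvInter, pvInter.eq_1]
    | cons y bs =>
      simp only [List.zip_cons_cons, List.foldl_cons, List.length_cons, List.drop_succ_cons]
      rw [ih bs (acc ++ [x, y])]
      simp [pvInter, List.append_assoc]

theorem pvAloop (ds : List (Int × Int)) :
    ∀ (s x1 y1 x2 y2 : Int) (vis : PySem.Set (Int × Int)), 0 ≤ s →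
      ((PySem.List.enumerate ds s).foldl
        (fun (st : Int × Int × Int × Int × PySem.Set (Int × Int)) p =>
          let (x1, y1, x2, y2, vis) := st
          if PySem.Int.mod p.1 2 == 0 then
            (x1 + p.2.1, y1 + p.2.2, x2, y2, PySem.Set.add vis (x1 + p.2.1, y1 + p.2.2))
          else
            (x1, y1, x2 + p.2.1, y2 + p.2.2, PySem.Set.add vis (x2 + p.2.1, y2 + p.2.2)))
        (x1, y1, x2, y2, vis)).2.2.2.2
      = PySem.Set.update vis
          (if PySem.Int.mod s 2 == 0 then
            pvInter (pvWalkFrom x1 y1 (pvEvens ds)) (pvWalkFrom x2 y2 (pvOdds ds))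
          else
            pvInter (pvWalkFrom x2 y2 (pvEvens ds)) (pvWalkFrom x1 y1 (pvOdds ds))) := by
  induction ds with
  | nil =>
    intro s x1 y1 x2 y2 vis hs
    simp [PySem.List.enumerate_nil, pvEvens, pvOdds, pvWalkFrom, pvInter, PySem.Set.update]
  | cons d t ih =>
    intro s x1 y1 x2 y2 vis hs
    rw [PySem.List.enumerate_cons, List.foldl_cons]
    have hmod : PySem.Int.mod s 2 = s % 2 := PySem.Int.mod_eq_emod_of_pos (by norm_num)
    have hmod1 : PySem.Int.mod (s + 1) 2 = (s + 1) % 2 := PySem.Int.mod_eq_emod_of_pos (by norm_num)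
    have hupd : ∀ (v : PySem.Set (Int × Int)) (p : Int × Int) (l : List (Int × Int)),
        PySem.Set.update v (p :: l) = PySem.Set.update (PySem.Set.add v p) l := fun _ _ _ => rfl
    by_cases h : s % 2 = 0
    · have hb : (PySem.Int.mod s 2 == 0) = true := by rw [hmod]; simp [h]
      have hb1 : (PySem.Int.mod (s + 1) 2 == 0) = false := by rw [hmod1]; simp; omega
      simp only [hb, if_true]
      rw [ih (s + 1) (x1 + d.1) (y1 + d.2) x2 y2 _ (by omega)]
      rw [hb1, if_neg (by simp)]
      rw [pvEvens_cons, pvOdds_cons]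
      simp only [pvWalkFrom, pvInter]
      rw [hupd]
    · have hb : (PySem.Int.mod s 2 == 0) = false := by rw [hmod]; simp [h]
      have hb1 : (PySem.Int.mod (s + 1) 2 == 0) = true := by rw [hmod1]; simp; omega
      simp only [hb, if_false, Bool.false_eq_true]
      rw [ih (s + 1) x1 y1 (x2 + d.1) (y2 + d.2) _ (by omega)]
      rw [hb1, if_pos (by simp)]
      rw [pvEvens_cons, pvOdds_cons]
      simp only [pvWalkFrom, pvInter]
      rw [hupd]

-- ===== VERDICT (by name: the statement is the Claim_ definition above) =====
theorem find_visited_spec : Claim_equal_find_visited := by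
  intro ds _
  show find_visited ds = find_visited_alt ds
  unfold find_visited find_visited_alt
  simp only [slice_evens, slice_odds, pvWalk_eq, PySem.List.len_eq,
    PySem.List.slice_from_natCast]
  rw [pvZipMerge]
  rw [pvAloop ds 0 0 0 0 0 _ le_rfl]
  have h0 : (PySem.Int.mod 0 2 == 0) = true := by decide
  rw [h0, if_pos rfl]
  rfl
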